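-- pv_equiv track=rewrite | github.com/yaezzin/codetree | 240125/1차원 폭발 게임/The-1D-bomb-game.py | get_consecutive_counts
-- ===== SOURCE A (Python) =====
-- def get_consecutive_counts(grid):
--     n = len(grid)
--     consecutive_counts = [0] * n
--
--     count = 0
--     for i in range(n-1, 0, -1):
--         if grid[i] == grid[i-1]:
--             count += 1
--         else:
--             count = 0
--
--         consecutive_counts[i] = count
--
--     return consecutive_counts
-- ===== SOURCE B (Python) =====
-- def get_consecutive_counts(grid):
--     # Build the answer run by run: each maximal run of equal elements of
--     # length m contributes [0, m-1, m-2, ..., 1].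
--     out = []
--     i, n = 0, len(grid)
--     while i < n:
--         j = i + 1
--         while j < n and grid[j] == grid[i]:
--             j += 1
--         out.append(0)
--         out.extend(range(j - i - 1, 0, -1))
--         i = j
--     return out
-- ===== Notes on version B (the rewrite author's own statement) =====
-- stated objective: alternative
-- what changed: B first finds each maximal run of equal elements (two nested index scans over runs) and emits that run's block [0, m-1, ..., 1] directly, instead of A's single backward pass threading a reset-on-change counter into a preallocated array.
import Mathlib
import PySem

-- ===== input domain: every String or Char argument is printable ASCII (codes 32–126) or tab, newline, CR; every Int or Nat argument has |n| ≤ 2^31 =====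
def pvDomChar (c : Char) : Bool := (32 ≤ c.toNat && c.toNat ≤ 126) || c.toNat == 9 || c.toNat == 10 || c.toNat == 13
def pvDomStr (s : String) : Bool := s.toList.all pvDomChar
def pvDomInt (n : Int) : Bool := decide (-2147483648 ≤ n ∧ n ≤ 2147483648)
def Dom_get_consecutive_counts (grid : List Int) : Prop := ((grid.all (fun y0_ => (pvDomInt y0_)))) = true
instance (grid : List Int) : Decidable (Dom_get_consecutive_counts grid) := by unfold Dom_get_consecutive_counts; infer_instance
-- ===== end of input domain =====

-- B rebuilds the result run by run (each maximal run of length m contributes [0, m-1, …, 1])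
-- instead of threading A's reset-on-change counter backwards; same cost, different decomposition.

-- ===== PORT A =====
-- loop body of A's 'for i in range(n-1, 0, -1)' (grid[i], grid[i-1], consecutive_counts[i] = count)
def pvStepA (grid : List Int) (st : List Int × Int) (i : Int) : List Int × Int :=
  let count : Int :=
    if PySem.List.pyGetD grid i 0 = PySem.List.pyGetD grid (i - 1) 0 then st.2 + 1 else 0
  (PySem.List.pySetD st.1 i count, count)

def get_consecutive_counts (grid : List Int) : List Int :=
  let n := grid.length
  let consecutive_counts : List Int := List.replicate n 0
  ((PySem.List.pyRange ((n : Int) - 1) 0 (-1)).foldl (pvStepA grid) (consecutive_counts, 0)).1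

-- ===== PORT B =====
-- inner while loop of Source B: number of leading elements of the list equal to v, and the rest
def pvTakeRun (v : Int) : List Int → Nat × List Int
  | [] => (0, [])
  | x :: xs => if x = v then ((pvTakeRun v xs).1 + 1, (pvTakeRun v xs).2) else (0, x :: xs)

theorem pvTakeRun_snd_length (v : Int) (xs : List Int) :
    (pvTakeRun v xs).2.length ≤ xs.length := by
  induction xs with
  | nil => simp [pvTakeRun]
  | cons x xs ih =>
    simp only [pvTakeRun]
    split
    · simpa using Nat.le_succ_of_le ih
    · simp

def get_consecutive_counts_alt : List Int → List Int
  | [] => []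
  | x :: xs =>
    let t := pvTakeRun x xs
    (0 : Int) :: (PySem.List.pyRange (t.1 : Int) 0 (-1) ++ get_consecutive_counts_alt t.2)
termination_by grid => grid.length
decreasing_by
  have := pvTakeRun_snd_length x xs
  simp only [List.length_cons]
  omega

-- ===== PRECONDITION & SPEC =====
def Spec_get_consecutive_counts (grid : List Int) (out : List Int) : Prop := out = get_consecutive_counts_alt grid
instance (grid : List Int) (out : List Int) : Decidable (Spec_get_consecutive_counts grid out) := by unfold Spec_get_consecutive_counts; infer_instance

-- ===== CLAIM (what is proved, stated in full; the proofs are below) =====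
def Claim_equal_get_consecutive_counts : Prop := ∀ (grid : List Int), Dom_get_consecutive_counts grid → Spec_get_consecutive_counts grid (get_consecutive_counts grid)

-- ===== LEMMAS AND PROOFS =====

-- value A's loop writes at position i when the loop runs from index m down, with counter k0 above m
def pvVals (grid : List Int) (k0 : Int) (m i : Nat) : Int :=
  if m < i then k0
  else if PySem.List.pyGetD grid (i : Int) 0 = PySem.List.pyGetD grid ((i : Int) - 1) 0
       then pvVals grid k0 m (i + 1) + 1
       else 0
termination_by m + 1 - i

theorem pvVals_of_gt (grid : List Int) (k0 : Int) (m i : Nat) (h : m < i) :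
    pvVals grid k0 m i = k0 := by
  rw [pvVals]; simp [h]

theorem pvVals_eq (grid : List Int) (k0 : Int) (m i : Nat) (h1 : 1 ≤ i) (h2 : i ≤ m) :
    pvVals grid k0 m i =
      if grid.getD i 0 = grid.getD (i - 1) 0 then pvVals grid k0 m (i + 1) + 1 else 0 := by
  rw [pvVals]
  have h3 : ¬ m < i := by omega
  have h4 : ((i : Int) - 1) = ((i - 1 : Nat) : Int) := by omega
  simp [h3, h4]

theorem pvVals_shift (grid : List Int) (k0 : Int) (m : Nat) :
    ∀ i, 1 ≤ i → i ≤ m →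
      pvVals grid (pvVals grid k0 (m + 1) (m + 1)) m i = pvVals grid k0 (m + 1) i := by
  intro i h1 h2
  induction hd : m - i generalizing i with
  | zero =>
    have hi : i = m := by omega
    subst hi
    rw [pvVals_eq _ _ _ _ h1 le_rfl, pvVals_eq _ _ _ _ h1 (by omega),
        pvVals_of_gt _ _ _ _ (by omega)]
  | succ d ih =>
    rw [pvVals_eq _ _ _ _ h1 h2, pvVals_eq _ _ _ _ h1 (by omega),
        ih (i + 1) (by omega) (by omega) (by omega)]

-- the fold of A's loop, characterised pointwise
theorem pvFoldA (grid : List Int) (m : Nat) (hm : 1 ≤ m) :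
    ∀ (cc0 : List Int) (k0 : Int), m < cc0.length →
      (PySem.List.pyRange (m : Int) 0 (-1)).foldl (pvStepA grid) (cc0, k0)
        = ((List.range cc0.length).map
             (fun i => if 1 ≤ i ∧ i ≤ m then pvVals grid k0 m i else cc0.getD i 0),
           pvVals grid k0 m 1) := by
  induction m, hm using Nat.le_induction with
  | base =>
    intro cc0 k0 hlen
    rw [show ((1 : Nat) : Int) = 1 by norm_num,
        PySem.List.pyRange_neg_one_cons (by norm_num),
        PySem.List.pyRange_neg_one_eq_nil (by norm_num)]
    simp only [List.foldl_cons, List.foldl_nil, pvStepA]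
    have hv : (if PySem.List.pyGetD grid (1 : Int) 0 = PySem.List.pyGetD grid ((1 : Int) - 1) 0
        then k0 + 1 else 0) = pvVals grid k0 1 1 := by
      rw [pvVals_eq grid k0 1 1 le_rfl le_rfl, pvVals_of_gt grid k0 1 2 (by omega)]
      norm_num [pysem]
    simp only [hv]
    refine Prod.ext ?_ rfl
    have hset : PySem.List.pySetD cc0 (1 : Int) (pvVals grid k0 1 1)
        = cc0.set 1 (pvVals grid k0 1 1) := by
      rw [show (1 : Int) = ((1 : Nat) : Int) by norm_num, PySem.List.pySetD_natCast]
    rw [hset]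
    apply List.ext_getElem
    · simp
    · intro i hi hi2
      simp only [List.getElem_set, List.getElem_map, List.getElem_range]
      simp only [List.length_set] at hi
      rcases Nat.lt_or_ge i 1 with h | h
      · have : i = 0 := by omega
        subst this
        simp [List.getElem?_eq_getElem hi]
      · rcases Nat.eq_or_lt_of_le h with h1 | h1
        · simp [← h1]
        · have hne : ¬ (1 = i) := by omega
          have hle : ¬ (i ≤ 1) := by omega
          simp [hne, hle, List.getElem?_eq_getElem hi]
  | succ m hm ih =>
    intro cc0 k0 hlen
    have hcast : (((m + 1 : Nat)) : Int) = (m : Int) + 1 := by push_cast; ring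
    rw [hcast, PySem.List.pyRange_neg_one_cons (by omega),
        show ((m : Int) + 1 - 1) = (m : Int) by ring]
    simp only [List.foldl_cons, pvStepA]
    have hv : (if PySem.List.pyGetD grid ((m : Int) + 1) 0
          = PySem.List.pyGetD grid ((m : Int) + 1 - 1) 0 then k0 + 1 else 0)
        = pvVals grid k0 (m + 1) (m + 1) := by
      rw [pvVals_eq grid k0 (m + 1) (m + 1) (by omega) le_rfl,
          pvVals_of_gt grid k0 (m + 1) (m + 2) (by omega),
          PySem.List.pyGetD_of_nonneg _ _ (by omega),
          PySem.List.pyGetD_of_nonneg _ _ (by omega),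
          show ((m : Int) + 1).toNat = m + 1 by omega,
          show ((m : Int) + 1 - 1).toNat = m by omega]
      norm_num
    set v := pvVals grid k0 (m + 1) (m + 1) with hvdef
    simp only [hv]
    have hset : PySem.List.pySetD cc0 ((m : Int) + 1) v = cc0.set (m + 1) v := by
      rw [show ((m : Int) + 1) = (((m + 1 : Nat)) : Int) by push_cast; ring,
          PySem.List.pySetD_natCast]
    rw [hset]
    rw [ih (cc0.set (m + 1) v) v (by simpa using Nat.lt_of_succ_lt hlen)]
    refine Prod.ext ?_ ?_
    · apply List.ext_getElem
      · simp
      · intro i hi hi2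
        simp only [List.getElem_map, List.getElem_range]
        simp only [List.length_map, List.length_range, List.length_set] at hi hi2 ⊢
        by_cases hr : 1 ≤ i ∧ i ≤ m
        · have hr' : 1 ≤ i ∧ i ≤ m + 1 := ⟨hr.1, by omega⟩
          simp only [hr, hr', and_self, if_pos]
          exact pvVals_shift grid k0 m i hr.1 hr.2
        · by_cases he : i = m + 1
          · subst he
            have h1 : 1 ≤ m + 1 ∧ m + 1 ≤ m + 1 := by omega
            simp only [if_neg hr, if_pos h1]
            rw [List.getD_eq_getElem _ _ (by simpa using hlen)]
            simp
            exact hvdef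
          · have hr' : ¬ (1 ≤ i ∧ i ≤ m + 1) := by omega
            simp only [hr, hr', if_false]
            rw [List.getD_eq_getElem _ _ (by simpa using hi),
                List.getD_eq_getElem _ _ hi]
            simp only [List.getElem_set]
            have : ¬ (m + 1 = i) := by omega
            simp [this]
    · exact pvVals_shift grid k0 m 1 le_rfl hm

-- closed pointwise form of A
def pvA (grid : List Int) : List Int :=
  (List.range grid.length).map
    (fun i => if 1 ≤ i then pvVals grid 0 (grid.length - 1) i else 0)

theorem A_eq_pvA (grid : List Int) : get_consecutive_counts grid = pvA grid := by
  rw [show get_consecutive_counts grid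
      = ((PySem.List.pyRange ((grid.length : Int) - 1) 0 (-1)).foldl (pvStepA grid)
          (List.replicate grid.length 0, 0)).1 from rfl]
  unfold pvA
  rcases Nat.lt_or_ge grid.length 2 with h | h
  · rw [PySem.List.pyRange_neg_one_eq_nil (by omega)]
    simp only [List.foldl_nil]
    apply List.ext_getElem
    · simp
    · intro i hi hi2
      simp only [List.length_replicate] at hi
      have : i = 0 := by omega
      subst this
      simp
  · have hcast : ((grid.length : Int) - 1) = ((grid.length - 1 : Nat) : Int) := by omega
    rw [hcast, pvFoldA grid (grid.length - 1) (by omega) _ 0 (by simp; omega)]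
    apply List.ext_getElem
    · simp
    · intro i hi hi2
      simp only [List.getElem_map, List.getElem_range, List.length_map, List.length_range,
        List.length_replicate] at hi hi2 ⊢
      by_cases h1 : 1 ≤ i
      · have h2 : i ≤ grid.length - 1 := by omega
        simp [h1, h2]
      · simp only [h1, false_and, if_false]
        simp at h1
        subst h1
        simp

theorem pvTakeRun_decomp (v : Int) (xs : List Int) :
    xs = List.replicate (pvTakeRun v xs).1 v ++ (pvTakeRun v xs).2
      ∧ ((pvTakeRun v xs).2 = [] ∨ ((pvTakeRun v xs).2 ≠ [] ∧ (pvTakeRun v xs).2.getD 0 0 ≠ v)) := by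
  induction xs with
  | nil => simp [pvTakeRun]
  | cons x xs ih =>
    simp only [pvTakeRun]
    by_cases hx : x = v
    · simp only [hx]
      refine ⟨?_, ih.2⟩
      conv_lhs => rw [ih.1]
      simp [List.replicate_succ]
    · simp [hx]

theorem getD_run_right (x : Int) (k : Nat) (r : List Int) (j : Nat) :
    (x :: List.replicate k x ++ r).getD (k + 1 + j) 0 = r.getD j 0 := by
  rw [List.getD_append_right _ _ _ _ (by simp)]
  congr 1
  simp

theorem getD_run_left (x : Int) (k : Nat) (r : List Int) (i : Nat) (hi : i ≤ k) :
    (x :: List.replicate k x ++ r).getD i 0 = x := by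
  rw [List.getD_append _ _ _ _ (by simp; omega),
      List.getD_eq_getElem _ _ (by simp; omega)]
  cases i with
  | zero => simp
  | succ i => simp

theorem pvVals_boundary (x : Int) (k : Nat) (r : List Int)
    (hr : r = [] ∨ (r ≠ [] ∧ r.getD 0 0 ≠ x)) :
    pvVals (x :: List.replicate k x ++ r) 0 (k + r.length) (k + 1) = 0 := by
  rcases hr with h | ⟨hne, h⟩
  · subst h
    exact pvVals_of_gt _ _ _ _ (by simp)
  · have hlen : 1 ≤ r.length := by
      cases r
      · simp at hne
      · simp
    rw [pvVals_eq _ _ _ _ (by omega) (by omega),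
        show k + 1 - 1 = k from by omega, getD_run_left x k r k le_rfl,
        show k + 1 = k + 1 + 0 from by omega, getD_run_right,
        if_neg h]

theorem pvVals_append (x : Int) (k : Nat) (r : List Int) :
    ∀ j, 1 ≤ j →
      pvVals (x :: List.replicate k x ++ r) 0 (k + r.length) (k + 1 + j)
        = pvVals r 0 (r.length - 1) j := by
  intro j hj
  induction hd : r.length - j generalizing j with
  | zero =>
    rw [pvVals_of_gt _ _ _ _ (by omega), pvVals_of_gt _ _ _ _ (by omega)]
  | succ d ih =>
    rw [pvVals_eq _ _ _ _ (by omega) (by omega), pvVals_eq _ _ _ _ hj (by omega)]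
    rw [show k + 1 + j + 1 = k + 1 + (j + 1) from by omega,
        ih (j + 1) (by omega) (by omega),
        show k + 1 + j - 1 = k + 1 + (j - 1) from by omega,
        getD_run_right, getD_run_right]

theorem pvVals_run (x : Int) (k : Nat) (r : List Int)
    (hr : r = [] ∨ (r ≠ [] ∧ r.getD 0 0 ≠ x)) :
    ∀ i, 1 ≤ i → i ≤ k →
      pvVals (x :: List.replicate k x ++ r) 0 (k + r.length) i = (k : Int) + 1 - i := by
  intro i h1 h2
  induction hd : k - i generalizing i with
  | zero =>
    have hik : i = k := by omega
    subst hik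
    rw [pvVals_eq _ _ _ _ h1 (by omega), getD_run_left x i r i le_rfl,
        getD_run_left x i r (i - 1) (by omega), pvVals_boundary x i r hr]
    simp
  | succ d ih =>
    rw [pvVals_eq _ _ _ _ h1 (by omega), getD_run_left x k r i h2,
        getD_run_left x k r (i - 1) (by omega), ih (i + 1) (by omega) (by omega) (by omega)]
    rw [if_pos rfl]
    push_cast
    ring

theorem pvA_eq_alt (grid : List Int) : pvA grid = get_consecutive_counts_alt grid := by
  induction grid using get_consecutive_counts_alt.induct with
  | case1 => simp [get_consecutive_counts_alt, pvA]
  | case2 x xs t ih =>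
    have ih' : pvA (pvTakeRun x xs).2 = get_consecutive_counts_alt (pvTakeRun x xs).2 := ih
    obtain ⟨hdec, hr⟩ := pvTakeRun_decomp x xs
    rw [get_consecutive_counts_alt, ← ih']
    have hxs : x :: xs = x :: List.replicate (pvTakeRun x xs).1 x ++ (pvTakeRun x xs).2 := by
      rw [List.cons_append, ← hdec]
    rw [hxs]
    generalize hk : (pvTakeRun x xs).1 = k at *
    generalize hrr : (pvTakeRun x xs).2 = r at *
    have hn : (x :: List.replicate k x ++ r).length = k + 1 + r.length := by
      simp
      omega
    have hlpr : (PySem.List.pyRange (k : Int) 0 (-1)).length = k := by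
      rw [PySem.List.length_pyRange_neg_one]
      omega
    apply List.ext_getElem
    · simp only [pvA, List.length_map, List.length_range, List.length_cons, List.length_append,
        hlpr, hn]
      omega
    · intro i hi hi2
      simp only [pvA, List.getElem_map, List.getElem_range, List.length_map, List.length_range] at hi ⊢
      rw [hn] at hi
      rw [show (x :: List.replicate k x ++ r).length - 1 = k + r.length from by rw [hn]; omega]
      cases i with
      | zero => simp
      | succ i =>
        simp only [List.getElem_cons_succ, PySem.List.pyRange_neg_one, Int.sub_zero,
          Int.toNat_natCast]
        rcases Nat.lt_or_ge i k with hik | hik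
        · rw [List.getElem_append_left (by simp; omega)]
          rw [pvVals_run x k r hr (i + 1) (by omega) (by omega)]
          simp only [List.getElem_map, List.getElem_range]
          have h1 : 1 ≤ i + 1 := by omega
          simp only [h1, if_pos]
          omega
        · rw [List.getElem_append_right (by simp; omega)]
          simp only [List.getElem_map, List.getElem_range, List.length_map,
            List.length_range]
          rcases Nat.eq_or_lt_of_le hik with he | hlt
          · rw [show i + 1 = k + 1 from by omega, pvVals_boundary x k r hr,
                show i - k = 0 from by omega]
            simp
          · have hj1 : 1 ≤ i - k := by omega
            rw [show i + 1 = k + 1 + (i - k) from by omega,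
                pvVals_append x k r (i - k) hj1,
                if_pos (by omega : 1 ≤ k + 1 + (i - k)), if_pos hj1]

-- ===== VERDICT (by name: the statement is the Claim_ definition above) =====
theorem get_consecutive_counts_spec : Claim_equal_get_consecutive_counts := by
  intro grid _
  show _ = _
  rw [A_eq_pvA, pvA_eq_alt]
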